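-- pv_equiv track=rewrite | github.com/Protozx/UrbanDataDashboard | app/routes.py | obtener_recomendaciones
-- ===== SOURCE A (Python) =====
-- def generar_bigrama(tags):
--     # Generar bigramas a partir de una lista de tags
--     # tags es una lista de tags vistos, cada dataset puede aportar varios tags
--     # Ej: tags = ["ciudad", "transporte", "verde", "transporte", "carretera", ...]
--     bigramas = {}
--     for i in range(len(tags)-1):
--         t1 = tags[i]
--         t2 = tags[i+1]
--         if t1 not in bigramas:
--             bigramas[t1] = {}
--         if t2 not in bigramas[t1]:
--             bigramas[t1][t2] = 0
--         bigramas[t1][t2] += 1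
--     return bigramas
--
-- def obtener_recomendaciones(tags_vistos, top_n=5):
--     # Dado tags_vistos (lista de tags que el usuario ha visto),
--     # genera un modelo bigrama y predice algunas etiquetas recomendadas.
--     if len(tags_vistos) < 2:
--         # No hay suficientes tags para bigramas
--         return []
--
--     bigramas = generar_bigrama(tags_vistos)
--     ultimo_tag = tags_vistos[-1]
--     if ultimo_tag in bigramas:
--         sugerencias = sorted(bigramas[ultimo_tag].items(), key=lambda x: x[1], reverse=True)
--         # sugerencias es una lista de tuplas (tag, frecuencia)
--         recomendadas = [s[0] for s in sugerencias[:top_n]]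
--         return recomendadas
--     else:
--         # El último tag no tiene continuaciones en el historial
--         return []
-- ===== SOURCE B (Python) =====
-- def obtener_recomendaciones(tags_vistos, top_n=5):
--     # Selection instead of dict+sort: repeatedly pick the most frequent remaining successor
--     # of the last tag (max with ties -> first appearance, matching A's stable sort).
--     if len(tags_vistos) < 2:
--         return []
--     ultimo = tags_vistos[-1]
--     sucesores = [s for p, s in zip(tags_vistos, tags_vistos[1:]) if p == ultimo]
--     candidatos = list(dict.fromkeys(sucesores))
--     orden = []
--     while candidatos:
--         mejor = max(candidatos, key=sucesores.count)
--         orden.append(mejor)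
--         candidatos.remove(mejor)
--     return orden[:top_n]
-- ===== Notes on version B (the rewrite author's own statement) =====
-- stated objective: alternative
-- what changed: Replaces the full nested bigram table plus stable sort with a filter of the successors of the last tag followed by repeated selection: while candidates remain, take max(candidatos, key=sucesores.count) (first max = A's stable tie-break), append and remove it; no dict of counts and no sort.
import Mathlib
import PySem

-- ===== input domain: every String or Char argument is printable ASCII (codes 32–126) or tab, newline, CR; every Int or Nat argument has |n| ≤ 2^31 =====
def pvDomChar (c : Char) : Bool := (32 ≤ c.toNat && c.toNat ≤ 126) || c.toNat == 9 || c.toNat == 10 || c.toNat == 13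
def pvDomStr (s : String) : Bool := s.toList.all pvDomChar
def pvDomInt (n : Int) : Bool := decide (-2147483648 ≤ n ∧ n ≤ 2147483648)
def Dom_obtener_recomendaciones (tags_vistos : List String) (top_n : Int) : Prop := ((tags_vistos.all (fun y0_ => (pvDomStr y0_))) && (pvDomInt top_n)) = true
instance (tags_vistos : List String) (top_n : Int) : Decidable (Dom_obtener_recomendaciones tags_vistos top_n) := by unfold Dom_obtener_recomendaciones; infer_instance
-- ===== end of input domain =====

-- B replaces A's nested bigram table + stable sort with repeated first-max selection over the successors of the last tag (objective: alternative).


-- ===== PORT A =====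
-- helper generar_bigrama; loop indices i, i+1 are always in range, so pyGetD's default "" is never used
def pvA_generar_bigrama (tags : List String) : PySem.Dict String (PySem.Dict String Int) :=
  (PySem.List.pyRange 0 ((tags.length : Int) - 1) 1).foldl (fun big i =>
    let t1 := PySem.List.pyGetD tags i ""
    let t2 := PySem.List.pyGetD tags (i + 1) ""
    let big' := if big.contains t1 then big else big.insert t1 PySem.Dict.empty
    let inner := big'.getD t1 PySem.Dict.empty
    let inner' := if inner.contains t2 then inner else inner.insert t2 0
    big'.insert t1 (inner'.insert t2 (inner'.getD t2 0 + 1))) PySem.Dict.empty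

def obtener_recomendaciones (tags_vistos : List String) (top_n : Int) : List String :=
  if (tags_vistos.length : Int) < 2 then []
  else
    let bigramas := pvA_generar_bigrama tags_vistos
    let ultimo_tag := PySem.List.pyGetD tags_vistos (-1) ""   -- index -1 valid: len ≥ 2
    if bigramas.contains ultimo_tag then
      let sugerencias := PySem.List.sorted (bigramas.getD ultimo_tag PySem.Dict.empty).items (fun x => x.2) true
      (PySem.List.slice sugerencias none (some top_n)).map (fun s => s.1)
    else []

-- ===== PORT B =====
-- the while loop: pick max(candidatos, key=sucesores.count) (first max), append, remove; terminates since erase shrinks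
def pvSel (sucesores : List String) (candidatos : List String) : List String :=
  match h : PySem.List.max? candidatos (fun c => (PySem.List.count sucesores c : Int)) with
  | none => []
  | some mejor => mejor :: pvSel sucesores (candidatos.erase mejor)
termination_by candidatos.length
decreasing_by
  have hm := PySem.List.max?_mem h
  have h1 := List.length_erase_of_mem hm
  have h2 := List.length_pos_of_mem hm
  omega

def obtener_recomendaciones_alt (tags_vistos : List String) (top_n : Int) : List String :=
  if (tags_vistos.length : Int) < 2 then []
  else
    let ultimo := PySem.List.pyGetD tags_vistos (-1) ""   -- index -1 valid: len ≥ 2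
    let sucesores := ((tags_vistos.zip (PySem.List.slice tags_vistos (some 1) none)).filter
        (fun p => p.1 == ultimo)).map (fun p => p.2)
    let candidatos := PySem.List.dedup sucesores          -- list(dict.fromkeys(sucesores))
    let orden := pvSel sucesores candidatos
    PySem.List.slice orden none (some top_n)

-- ===== PRECONDITION & SPEC =====
def Spec_obtener_recomendaciones (tags_vistos : List String) (top_n : Int) (out : List String) : Prop := out = obtener_recomendaciones_alt tags_vistos top_n
instance (tags_vistos : List String) (top_n : Int) (out : List String) : Decidable (Spec_obtener_recomendaciones tags_vistos top_n out) := by unfold Spec_obtener_recomendaciones; infer_instance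

-- ===== CLAIM (what is proved, stated in full; the proofs are below) =====
def Claim_equal_obtener_recomendaciones : Prop := ∀ (tags_vistos : List String) (top_n : Int), Dom_obtener_recomendaciones tags_vistos top_n → Spec_obtener_recomendaciones tags_vistos top_n (obtener_recomendaciones tags_vistos top_n)

-- ===== LEMMAS AND PROOFS =====

def pvAstep (big : PySem.Dict String (PySem.Dict String Int)) (p : String × String) :
    PySem.Dict String (PySem.Dict String Int) :=
  let big' := if big.contains p.1 then big else big.insert p.1 PySem.Dict.empty
  let inner := big'.getD p.1 PySem.Dict.empty
  let inner' := if inner.contains p.2 then inner else inner.insert p.2 0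
  big'.insert p.1 (inner'.insert p.2 (inner'.getD p.2 0 + 1))

def pvCnt (d : PySem.Dict String Int) (t : String) : PySem.Dict String Int :=
  d.insert t (d.getD t 0 + 1)

def pvBstep (u : String) (d : PySem.Dict String Int) (p : String × String) : PySem.Dict String Int :=
  if p.1 == u then pvCnt d p.2 else d

lemma pairs_eq (xs : List String) :
    (PySem.List.pyRange 0 ((xs.length : Int) - 1) 1).map
      (fun i => (PySem.List.pyGetD xs i "", PySem.List.pyGetD xs (i + 1) "")) = xs.zip xs.tail := by
  apply List.ext_getElem
  · simp [PySem.List.length_pyRange_one]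
  · intro k h1 h2
    have hk : k < xs.length - 1 := by
      simp [PySem.List.length_pyRange_one] at h1; omega
    have hget : (PySem.List.pyRange 0 ((xs.length : Int) - 1) 1)[k]'(by simpa using h1) = (k : Int) := by
      rw [PySem.List.getElem_pyRange_one]; ring
    simp only [List.getElem_map, hget, List.getElem_zip]
    have h1' : ((k : Int) + 1) = ((k + 1 : Nat) : Int) := by push_cast; ring
    rw [h1', PySem.List.pyGetD_natCast, PySem.List.pyGetD_natCast]
    have hk1 : k < xs.length := by omega
    have hk2 : k + 1 < xs.length := by omega
    simp [List.getD_eq_getElem?_getD, hk1, hk2, List.getElem_tail]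

lemma stepA_get? (big : PySem.Dict String (PySem.Dict String Int)) (t1 t2 u : String) :
    (pvAstep big (t1, t2)).get? u =
      if t1 == u then
        some (pvCnt ((big.get? u).getD PySem.Dict.empty) t2)
      else big.get? u := by
  unfold pvAstep pvCnt
  by_cases ht : t1 = u
  · subst ht
    by_cases hc : big.contains t1 = true
    · simp only [hc, if_true, beq_self_eq_true]
      rw [PySem.Dict.get?_insert_self]
      rw [PySem.Dict.getD_eq_get?_getD]
      by_cases h2 : ((big.get? t1).getD PySem.Dict.empty).contains t2 = true
      · simp [h2]
      · simp only [h2, if_false, Bool.false_eq_true]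
        rw [PySem.Dict.getD_insert_self, PySem.Dict.insert_insert_self,
          PySem.Dict.getD_of_not_contains _ _ (by simpa using h2)]
    · simp only [hc, if_false, Bool.false_eq_true, beq_self_eq_true, if_true]
      rw [PySem.Dict.get?_insert_self, PySem.Dict.getD_insert_self]
      have hnone : big.get? t1 = none := by
        rw [PySem.Dict.get?_eq_none_iff_contains]; simpa using hc
      rw [hnone]
      simp [PySem.Dict.insert_insert_self, PySem.Dict.getD_empty, PySem.Dict.contains_empty,
        PySem.Dict.getD_insert_self]
  · have hb : (t1 == u) = false := by simpa using ht
    simp only [hb, Bool.false_eq_true, if_false]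
    by_cases hc : big.contains t1 = true
    · simp only [hc, if_true]
      rw [PySem.Dict.get?_insert_of_ne _ _ (Ne.symm ht)]
    · simp only [hc, Bool.false_eq_true, if_false]
      rw [PySem.Dict.get?_insert_of_ne _ _ (Ne.symm ht),
        PySem.Dict.get?_insert_of_ne _ _ (Ne.symm ht)]

lemma foldA_get? (u : String) (ps : List (String × String)) :
    ∀ (big : PySem.Dict String (PySem.Dict String Int)),
    (ps.foldl pvAstep big).get? u =
      ps.foldl (fun o p =>
        if p.1 == u then some (pvCnt (o.getD PySem.Dict.empty) p.2) else o) (big.get? u) := by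
  induction ps with
  | nil => intro big; rfl
  | cons p t ih =>
    intro big
    obtain ⟨t1, t2⟩ := p
    simp only [List.foldl_cons]
    rw [ih, stepA_get?]

lemma optfold_some (u : String) (t : List (String × String)) :
    ∀ (d : PySem.Dict String Int),
    t.foldl (fun o p => if p.1 == u then some (pvCnt (o.getD PySem.Dict.empty) p.2) else o) (some d)
      = some (t.foldl (pvBstep u) d) := by
  induction t with
  | nil => intro d; rfl
  | cons p t ih =>
    intro d
    simp only [List.foldl_cons, pvBstep]
    by_cases h : p.1 == u
    · simp only [h, if_true, Option.getD_some, ih]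
    · simp only [h, Bool.false_eq_true, if_false, ih]

lemma optfold_none (u : String) (ps : List (String × String)) :
    ps.foldl (fun o p => if p.1 == u then some (pvCnt (o.getD PySem.Dict.empty) p.2) else o) none
      = if ps.any (fun p => p.1 == u) then some (ps.foldl (pvBstep u) PySem.Dict.empty) else none := by
  induction ps with
  | nil => rfl
  | cons p t ih =>
    simp only [List.foldl_cons, List.any_cons]
    by_cases h : p.1 == u
    · simp only [h, if_true, Bool.true_or, Option.getD_none, optfold_some, pvBstep]
    · simp only [h, Bool.false_eq_true, if_false, Bool.false_or, ih, pvBstep]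

lemma bfold_eq_counter (u : String) (ps : List (String × String)) :
    ps.foldl (pvBstep u) PySem.Dict.empty
      = PySem.Dict.counter ((ps.filter (fun p => p.1 == u)).map (fun p => p.2)) := by
  unfold pvBstep pvCnt
  refine Eq.trans (PySem.List.foldl_if_eq_foldl_filter (fun (p : String × String) => p.1 == u)
    (fun (d : PySem.Dict String Int) p => d.insert p.2 (d.getD p.2 0 + 1)) ps PySem.Dict.empty) ?_
  rw [← PySem.Dict.foldl_insert_getD_add_one_eq_counter, List.foldl_map]

-- stable descending sort = repeated extraction of the FIRST maximum
lemma sorted_rev_select {α : Type} [BEq α] [LawfulBEq α] (key : α → Int) (l : List α) :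
    PySem.List.sorted l key true =
      (match PySem.List.max? l key with
       | none => []
       | some m => m :: PySem.List.sorted (l.erase m) key true) := by
  induction l using List.reverseRecOn with
  | nil => rfl
  | append_singleton l x ih =>
    have hsort : ∀ (l' : List α), PySem.List.sorted (l' ++ [x]) key true =
        PySem.List.insertBy (fun a b => decide (key b < key a)) x (PySem.List.sorted l' key true) := by
      intro l'
      rw [PySem.List.sorted_rev_eq_foldl_insertBy, PySem.List.sorted_rev_eq_foldl_insertBy,
        List.foldl_append]
      rfl
    have hmax : PySem.List.max? (l ++ [x]) key =
        (match PySem.List.max? l key with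
         | none => some x
         | some m => if key m < key x then some x else some m) := by
      unfold PySem.List.max?
      rw [List.foldl_append]
      rfl
    cases hm : PySem.List.max? l key with
    | none =>
      have hl : l = [] := (PySem.List.max?_eq_none_iff l key).mp hm
      subst hl
      rw [hsort]
      have h1 : PySem.List.max? ([] ++ [x] : List α) key = some x := rfl
      rw [List.nil_append] at h1 ⊢
      rw [h1]
      show PySem.List.insertBy (fun a b => decide (key b < key a)) x (PySem.List.sorted [] key true)
        = x :: PySem.List.sorted ([x].erase x) key true
      rw [List.erase_cons_head]
      rfl
    | some m =>
      rw [hsort, ih, hm, hmax, hm]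
      by_cases hlt : key m < key x
      · have hxl : x ∉ l := by
          intro hx
          have := PySem.List.max?_isMax hm x hx
          omega
        have herase : (l ++ [x]).erase x = l := by
          rw [List.erase_append_right _ hxl]
          simp
        simp only [hlt, if_true, herase]
        rw [ih, hm]
        simp [PySem.List.insertBy, hlt]
      · have hml : m ∈ l := PySem.List.max?_mem hm
        have herase : (l ++ [x]).erase m = l.erase m ++ [x] :=
          List.erase_append_left _ hml
        simp only [hlt, if_false, herase]
        rw [hsort]
        simp [PySem.List.insertBy, hlt]

lemma max?_map {α β : Type} (g : α → β) (key : β → Int) (l : List α) :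
    PySem.List.max? (l.map g) key = (PySem.List.max? l (fun a => key (g a))).map g := by
  unfold PySem.List.max?
  rw [List.foldl_map]
  suffices h : ∀ acc : Option α,
      l.foldl (fun (o : Option β) x =>
        match o with
        | none => some (g x)
        | some m => if key m < key (g x) then some (g x) else some m) (acc.map g)
      = (l.foldl (fun (o : Option α) x =>
          match o with
          | none => some x
          | some m => if key (g m) < key (g x) then some x else some m) acc).map g by
    simpa using h none
  induction l with
  | nil => intro acc; rfl
  | cons a t ih =>
    intro acc
    simp only [List.foldl_cons]
    cases acc with
    | none => exact ih (some a)
    | some m =>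
      simp only [Option.map_some]
      by_cases h : key (g m) < key (g a)
      · simpa [h] using ih (some a)
      · simpa [h] using ih (some m)

lemma slice_map {α β : Type} (f : α → β) (xs : List α) (a b : Option Int) :
    PySem.List.slice (xs.map f) a b = (PySem.List.slice xs a b).map f := by
  simp [PySem.List.slice, List.map_take, List.map_drop]

-- unfolding equations for the selection loop
lemma pvSel_none (xs c : List String)
    (hm : PySem.List.max? c (fun t => (PySem.List.count xs t : Int)) = none) :
    pvSel xs c = [] := by
  rw [pvSel.eq_def]
  split
  · rfl
  · rename_i h
    rw [hm] at h
    cases h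

lemma pvSel_some (xs c : List String) (m : String)
    (hm : PySem.List.max? c (fun t => (PySem.List.count xs t : Int)) = some m) :
    pvSel xs c = m :: pvSel xs (c.erase m) := by
  rw [pvSel.eq_def]
  split
  · rename_i h
    rw [hm] at h
    cases h
  · rename_i mejor h
    rw [hm] at h
    cases h
    rfl

-- the selection loop computes the first components of the stable count-descending sort
lemma sel_eq_sorted (xs : List String) : ∀ (n : Nat) (c : List String), c.length = n →
    (PySem.List.sorted (c.map (fun t => (t, (List.count t xs : Int)))) (fun p => p.2) true).map (fun p => p.1)
      = pvSel xs c := by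
  intro n
  induction n using Nat.strong_induction_on with
  | _ n ih =>
    intro c hc
    rw [sorted_rev_select]
    rw [max?_map (g := fun t => (t, (List.count t xs : Int))) (key := fun p => p.2) (l := c)]
    have hkey : (fun a => (fun p : String × Int => p.2) ((fun t => (t, (List.count t xs : Int))) a))
        = (fun t => (PySem.List.count xs t : Int)) := rfl
    rw [hkey]
    cases hm : PySem.List.max? c (fun t => (PySem.List.count xs t : Int)) with
    | none =>
      rw [pvSel_none xs c hm]
      rfl
    | some m =>
      rw [pvSel_some xs c m hm]
      simp only [Option.map_some, List.map_cons]
      have hinj : Function.Injective (fun t : String => (t, (List.count t xs : Int))) := by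
        intro a b h
        exact congrArg Prod.fst h
      rw [← List.map_erase hinj]
      have hmem : m ∈ c := PySem.List.max?_mem hm
      have hlen : (c.erase m).length = c.length - 1 := List.length_erase_of_mem hmem
      have hpos : 0 < c.length := List.length_pos_of_mem hmem
      rw [ih ((c.erase m).length) (by omega) (c.erase m) rfl]

-- ===== VERDICT (by name: the statement is the Claim_ definition above) =====
-- A's sorted nested-table row at the last tag equals B's repeated-first-max selection
theorem obtener_recomendaciones_spec : Claim_equal_obtener_recomendaciones := by
  intro tags top_n _
  unfold Spec_obtener_recomendaciones obtener_recomendaciones obtener_recomendaciones_alt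
  by_cases hlen : (tags.length : Int) < 2
  · simp [hlen]
  · simp only [hlen, if_false]
    have hA : pvA_generar_bigrama tags = (tags.zip tags.tail).foldl pvAstep PySem.Dict.empty := by
      unfold pvA_generar_bigrama
      rw [← pairs_eq tags, List.foldl_map]
      rfl
    have hps : PySem.List.slice tags (some 1) none = tags.tail := PySem.List.slice_from_one tags
    set u := PySem.List.pyGetD tags (-1) "" with hu
    set suc := (((tags.zip tags.tail).filter (fun p => p.1 == u)).map (fun p => p.2)) with hsuc
    have key := foldA_get? u (tags.zip tags.tail) PySem.Dict.empty
    rw [PySem.Dict.get?_empty, optfold_none, bfold_eq_counter] at key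
    by_cases hany : (tags.zip tags.tail).any (fun p => p.1 == u) = true
    · have hget : ((tags.zip tags.tail).foldl pvAstep PySem.Dict.empty).get? u
          = some (PySem.Dict.counter suc) := by
        rw [key, if_pos hany]
      have hcont : ((tags.zip tags.tail).foldl pvAstep PySem.Dict.empty).contains u = true := by
        rw [PySem.Dict.contains_eq_isSome_get?, hget]; rfl
      have hgetD := PySem.Dict.getD_of_get?_eq_some _ PySem.Dict.empty hget
      simp only [hA, hcont, if_true, hgetD, hps, ← hsuc]
      rw [PySem.Dict.items_counter, ← slice_map,
        sel_eq_sorted suc ((PySem.Set.ofList suc).length) (PySem.Set.ofList suc) rfl]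
      rfl
    · have hnone : ((tags.zip tags.tail).foldl pvAstep PySem.Dict.empty).get? u = none := by
        rw [key, if_neg hany]
      have hcont : ((tags.zip tags.tail).foldl pvAstep PySem.Dict.empty).contains u = false := by
        rw [PySem.Dict.contains_eq_isSome_get?, hnone]; rfl
      have hany' : (tags.zip tags.tail).any (fun p => p.1 == u) = false := by
        revert hany
        cases (tags.zip tags.tail).any (fun p => p.1 == u) <;> simp
      have hfil : (tags.zip tags.tail).filter (fun p => p.1 == u) = [] :=
        List.filter_eq_nil_iff.mpr (List.any_eq_false.mp hany')
      simp only [hA, hcont, Bool.false_eq_true, if_false, hps, ← hsuc]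
      rw [hsuc, hfil]
      have hsel : pvSel ([] : List String) [] = [] := pvSel_none _ _ rfl
      simp only [List.map_nil, PySem.List.dedup, PySem.Set.ofList, PySem.Set.empty,
        List.foldl_nil, hsel]
      simp [PySem.List.slice]
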